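-- pv_equiv track=rewrite | github.com/John-Kilroy/MSFS-DIS-Gateway- | extern/FlightSimSDK/Tools/3dsMax/MSFS2024Package/scripts/msfs_max_py_2024/TextureTool2024/TextureLib/BitmapConfig.py | compatibleBitmapIndex
-- ===== SOURCE A (Python) =====
-- compatibleIndexes = [
-- 	[1, 5, 7],		# MTL_BITMAP_DECAL0, MTL_BITMAP_ADD_DECAL0, MTL_BITMAP_EMISSIVE
-- 	[3, 6],			# MTL_BITMAP_NORMAL, MTL_BITMAP_ADD_NORMAL
-- 	[4, 8],			# MTL_BITMAP_DIRT, MTL_BITMAP_DETAILDIFFUSE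
-- 	[10, 12],		# MTL_BITMAP_WETNESS_AO, MTL_BITMAP_DETAIL_METAL_ROUGH_AO
-- 	[11, 13, 25],	# MTL_BITMAP_METAL_ROUGH_AO, MTL_BITMAP_ADD_METAL_ROUGH_AO, MTL_BITMAP_DIRT_METAL_ROUGH_AO
-- 	[14],			# MTL_BITMAP_OCCLUSION
-- 	[15],			# MTL_BITMAP_CLEARCOATCOLORROUGHNESS
-- 	[16],			# MTL_BITMAP_CLEARCOATNORMAL
-- 	[17],			# MTL_BITMAP_ANISO_DIR_ROUGH
-- 	[18],			# MTL_BITMAP_WIPERMASK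
-- 	[19],			# MTL_BITMAP_WINDSHIELDDETAILNORMAL
-- 	[20],			# MTL_BITMAP_SCRATCHESNORMAL
-- 	[21],			# MTL_BITMAP_ALPHABLENDMASK
-- 	[22],			# MTL_BITMAP_IRIDESCENTTHICKNESS
-- 	[23],			# MTL_BITMAP_WINDSHIELDINSECTS
-- 	[24],			# MTL_BITMAP_WINDSHIELDINSECTSMASK
-- 	[26],			# MTL_BITMAP_TIREDETAILS
-- 	[27],			# MTL_BITMAP_TIREMUDNORMAL
-- 	[28],			# MTL_BITMAP_DIRTOVERLAY
-- ]
--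
-- def compatibleBitmapIndex(index1, index2) :
-- 	""" Return True if both index are compatibles """
-- 	if index1 == 0 or index2 == 0 :
-- 		return False
-- 	if index1 == index2 :
-- 		return True
-- 	for c in compatibleIndexes :
-- 		if (index1 in c) and (index2 in c) :
-- 			return True
-- 	return False
-- ===== SOURCE B (Python) =====
-- compatibleIndexes = [
-- 	[1, 5, 7],
-- 	[3, 6],
-- 	[4, 8],
-- 	[10, 12],
-- 	[11, 13, 25],
-- 	[14],
-- 	[15],
-- 	[16],
-- 	[17],
-- 	[18],
-- 	[19],
-- 	[20],
-- 	[21],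
-- 	[22],
-- 	[23],
-- 	[24],
-- 	[26],
-- 	[27],
-- 	[28],
-- ]
--
-- indexToGroup = {}
-- for _gid, _group in enumerate(compatibleIndexes):
-- 	for _idx in _group:
-- 		indexToGroup[_idx] = _gid
--
-- def compatibleBitmapIndex(index1, index2):
-- 	""" Return True if both index are compatibles """
-- 	if index1 == 0 or index2 == 0:
-- 		return False
-- 	if index1 == index2:
-- 		return True
-- 	g1 = indexToGroup.get(index1)
-- 	return g1 is not None and g1 == indexToGroup.get(index2)
-- ===== Notes on version B (the rewrite author's own statement) =====
-- stated objective: simpler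
-- what changed: Replaces the per-call scan over the groups (membership test of both indices in each group) with a flat index->group-id dict precomputed once at module load; the function body becomes two O(1) lookups and a group-id comparison.
import Mathlib
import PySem

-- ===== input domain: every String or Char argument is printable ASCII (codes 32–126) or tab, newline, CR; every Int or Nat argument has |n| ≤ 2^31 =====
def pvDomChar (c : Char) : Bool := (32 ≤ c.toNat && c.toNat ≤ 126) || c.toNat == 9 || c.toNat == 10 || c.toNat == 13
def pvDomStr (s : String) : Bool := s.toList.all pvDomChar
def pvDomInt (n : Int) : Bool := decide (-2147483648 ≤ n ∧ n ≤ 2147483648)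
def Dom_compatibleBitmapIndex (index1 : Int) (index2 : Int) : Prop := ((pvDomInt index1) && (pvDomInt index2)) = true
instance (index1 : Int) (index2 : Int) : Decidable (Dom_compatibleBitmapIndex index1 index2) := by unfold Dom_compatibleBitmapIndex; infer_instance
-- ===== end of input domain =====

-- B replaces A's per-call scan over the group table by a flat index->group-id dict built once; simpler per-call body.

-- module-level constant shared by both Pythons
def compatibleIndexes : List (List Int) :=
  [[1, 5, 7], [3, 6], [4, 8], [10, 12], [11, 13, 25], [14], [15], [16], [17],
   [18], [19], [20], [21], [22], [23], [24], [26], [27], [28]]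

-- ===== PORT A =====
-- the 'for c in compatibleIndexes' loop with early return True
def compatLoopA (cs : List (List Int)) (index1 index2 : Int) : Bool :=
  match cs with
  | [] => false
  | c :: rest =>
      if c.contains index1 && c.contains index2 then true
      else compatLoopA rest index1 index2

def compatibleBitmapIndex (index1 : Int) (index2 : Int) : Bool :=
  if index1 == 0 || index2 == 0 then false
  else if index1 == index2 then true
  else compatLoopA compatibleIndexes index1 index2

-- ===== PORT B =====
-- the module-level 'for _gid, _group in enumerate(...): for _idx in _group: d[_idx] = _gid'
def indexToGroup : PySem.Dict Int Int :=
  (PySem.List.enumerate compatibleIndexes).foldl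
    (fun d p => p.2.foldl (fun d idx => d.insert idx p.1) d) PySem.Dict.empty

def compatibleBitmapIndex_alt (index1 : Int) (index2 : Int) : Bool :=
  if index1 == 0 || index2 == 0 then false
  else if index1 == index2 then true
  else
    match indexToGroup.get? index1 with   -- g1 = indexToGroup.get(index1)
    | none => false                        -- g1 is None
    | some g1 => indexToGroup.get? index2 == some g1

-- ===== PRECONDITION & SPEC =====
def Spec_compatibleBitmapIndex (index1 : Int) (index2 : Int) (out : Bool) : Prop := out = compatibleBitmapIndex_alt index1 index2
instance (index1 : Int) (index2 : Int) (out : Bool) : Decidable (Spec_compatibleBitmapIndex index1 index2 out) := by unfold Spec_compatibleBitmapIndex; infer_instance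

-- ===== CLAIM (what is proved, stated in full; the proofs are below) =====
def Claim_equal_compatibleBitmapIndex : Prop := ∀ (index1 : Int) (index2 : Int), Dom_compatibleBitmapIndex index1 index2 → Spec_compatibleBitmapIndex index1 index2 (compatibleBitmapIndex index1 index2)

-- ===== LEMMAS AND PROOFS =====

-- all indices occurring in the table
def allIdx : List Int :=
  [1, 5, 7, 3, 6, 4, 8, 10, 12, 11, 13, 25, 14, 15, 16, 17, 18, 19, 20, 21, 22, 23, 24, 26, 27, 28]

theorem loopA_false_left (i1 i2 : Int) (h : i1 ∉ allIdx) :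
    compatLoopA compatibleIndexes i1 i2 = false := by
  simp [allIdx] at h
  obtain ⟨h1, h5, h7, h3, h6, h4, h8, _⟩ := h
  simp [compatibleIndexes, compatLoopA, List.contains_eq_mem]
  omega

theorem loopA_false_right (i1 i2 : Int) (h : i2 ∉ allIdx) :
    compatLoopA compatibleIndexes i1 i2 = false := by
  simp [allIdx] at h
  obtain ⟨h1, h5, h7, h3, h6, h4, h8, _⟩ := h
  simp [compatibleIndexes, compatLoopA, List.contains_eq_mem]
  omega

theorem get?_none_of_not_mem (i : Int) (h : i ∉ allIdx) :
    indexToGroup.get? i = none := by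
  simp [allIdx] at h
  simp [indexToGroup, compatibleIndexes, PySem.List.enumerate, PySem.Dict.empty,
        PySem.Dict.insert, PySem.Dict.get?]
  omega

theorem main_eq (i1 i2 : Int) :
    compatibleBitmapIndex i1 i2 = compatibleBitmapIndex_alt i1 i2 := by
  by_cases hm1 : i1 ∈ allIdx
  · by_cases hm2 : i2 ∈ allIdx
    · fin_cases hm1 <;> fin_cases hm2 <;> decide
    · unfold compatibleBitmapIndex compatibleBitmapIndex_alt
      rw [loopA_false_right i1 i2 hm2, get?_none_of_not_mem i2 hm2]
      cases h1 : indexToGroup.get? i1 <;> simp_all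
  · unfold compatibleBitmapIndex compatibleBitmapIndex_alt
    rw [loopA_false_left i1 i2 hm1, get?_none_of_not_mem i1 hm1]

-- ===== VERDICT (by name: the statement is the Claim_ definition above) =====
theorem compatibleBitmapIndex_spec : Claim_equal_compatibleBitmapIndex := by
  intro i1 i2 _
  unfold Spec_compatibleBitmapIndex
  exact main_eq i1 i2
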